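-- pv_equiv track=rewrite | github.com/elrama-/VZcomp | VZcomp/translations.py | split_entangling
-- ===== SOURCE A (Python) =====
-- def split_entangling(script):
--     '''
--     Splits a QASM script into stages of 1Q gates and 2Q CPhase gates.
--     Sequential 2Q gates are seperated by ';' which is used to seperate them later on.
--     '''
--     list_1Q = []
--     list_2Q = []
--     accum_1Q = []
--     for i in range(len(script)):
--         line = script[i]
--         if line[:6] == 'CPhase':
--             if accum_1Q == [] and list_2Q == []:
--                 list_2Q.append(line)
--             elif accum_1Q == [] and list_2Q != []:
--                 list_2Q[-1] += ';' + line
--             else: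
--                 list_2Q.append(line)
--                 list_1Q.append(accum_1Q)
--                 accum_1Q = []
--         else:
--             accum_1Q.append(line)
--     list_1Q.append(accum_1Q)
--     return list_1Q, list_2Q
-- ===== SOURCE B (Python) =====
-- def split_entangling(script):
--     '''
--     Run-based split: scan maximal runs of CPhase / non-CPhase lines, join each
--     CPhase run with ';' directly instead of per-line accumulation and merging.
--     '''
--     list_1Q = []
--     list_2Q = []
--     pending = []
--     i = 0
--     n = len(script)
--     while i < n:
--         is2 = script[i][:6] == 'CPhase'
--         j = i + 1
--         while j < n and (script[j][:6] == 'CPhase') == is2: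
--             j += 1
--         run = script[i:j]
--         if is2:
--             if pending:
--                 list_1Q.append(pending)
--                 pending = []
--             list_2Q.append(';'.join(run))
--         else:
--             pending = run
--         i = j
--     list_1Q.append(pending)
--     return list_1Q, list_2Q
-- ===== Notes on version B (the rewrite author's own statement) =====
-- stated objective: alternative
-- what changed: B scans the script as maximal runs of CPhase/non-CPhase lines (inner while to find each run end, then ';'.join on the whole run) instead of A's per-line loop with a 1Q accumulator and in-place ';'-merging into list_2Q[-1].
import Mathlib
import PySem

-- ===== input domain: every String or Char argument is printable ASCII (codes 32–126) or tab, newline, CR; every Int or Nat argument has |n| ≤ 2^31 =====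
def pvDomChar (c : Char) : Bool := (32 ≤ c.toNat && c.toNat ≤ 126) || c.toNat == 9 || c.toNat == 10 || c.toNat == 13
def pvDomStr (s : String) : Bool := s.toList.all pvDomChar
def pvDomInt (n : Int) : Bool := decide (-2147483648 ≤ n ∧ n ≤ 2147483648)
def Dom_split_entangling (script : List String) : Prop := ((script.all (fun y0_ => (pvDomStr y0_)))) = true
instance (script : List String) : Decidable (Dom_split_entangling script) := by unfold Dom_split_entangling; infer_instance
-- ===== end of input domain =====

-- B re-implements split_entangling by scanning maximal CPhase/non-CPhase runs and joining
-- each CPhase run with ';' at once, instead of A's per-line accumulator with last-element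
-- merging (objective: alternative decomposition, same asymptotic cost).


-- ===== PORT A =====
-- list_2Q[-1] += s  (the branch using it is guarded by 'l2 ≠ []', so the [] case is unreachable)
def pvAddLast : List String → String → List String
  | [], _ => []
  | [x], s => [x ++ s]
  | x :: xs, s => x :: pvAddLast xs s

-- one iteration of A's for-loop; state = (list_1Q, list_2Q, accum_1Q)
def pvStepA (st : List (List String) × List String × List String) (line : String) :
    List (List String) × List String × List String :=
  let (l1, l2, accum) := st
  if PySem.Str.slice line none (some 6) == "CPhase" then
    if accum = [] ∧ l2 = [] then (l1, l2 ++ [line], accum)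
    else if accum = [] ∧ l2 ≠ [] then (l1, pvAddLast l2 (";" ++ line), accum)
    else (l1 ++ [accum], l2 ++ [line], ([] : List String))
  else (l1, l2, accum ++ [line])

def split_entangling (script : List String) : List (List String) × List String :=
  let st := script.foldl pvStepA ([], [], [])
  (st.1 ++ [st.2.2], st.2.1)

-- ===== PORT B =====
-- Source B's outer while-loop: take the maximal run with the same CPhase-key, handle it, recurse on the rest
def pvGoB (pending : List String) (l1 : List (List String)) (l2 : List String) :
    List String → List (List String) × List String
  | [] => (l1 ++ [pending], l2)
  | x :: xs =>
    let is2 := PySem.Str.slice x none (some 6) == "CPhase"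
    let run := x :: xs.takeWhile (fun y => (PySem.Str.slice y none (some 6) == "CPhase") == is2)
    let rest := xs.dropWhile (fun y => (PySem.Str.slice y none (some 6) == "CPhase") == is2)
    if is2 then
      pvGoB [] (if pending ≠ [] then l1 ++ [pending] else l1) (l2 ++ [PySem.Str.join ";" run]) rest
    else
      pvGoB run l1 l2 rest
termination_by script => script.length
decreasing_by
  all_goals exact Nat.lt_of_le_of_lt (List.length_dropWhile_le _ _) (by simp)

def split_entangling_alt (script : List String) : List (List String) × List String :=
  pvGoB [] [] [] script

-- ===== PRECONDITION & SPEC =====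
def Spec_split_entangling (script : List String) (out : List (List String) × List String) : Prop := out = split_entangling_alt script
instance (script : List String) (out : List (List String) × List String) : Decidable (Spec_split_entangling script out) := by unfold Spec_split_entangling; infer_instance

-- ===== CLAIM (what is proved, stated in full; the proofs are below) =====
def Claim_equal_split_entangling : Prop := ∀ (script : List String), Dom_split_entangling script → Spec_split_entangling script (split_entangling script)

-- ===== LEMMAS AND PROOFS =====

-- the CPhase key of a line
def pvKey (y : String) : Bool := PySem.Str.slice y none (some 6) == "CPhase"

theorem pvAddLast_append (l2 : List String) (c s : String) :
    pvAddLast (l2 ++ [c]) s = l2 ++ [c ++ s] := by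
  induction l2 with
  | nil => rfl
  | cons x xs ih =>
    cases xs with
    | nil => simp [pvAddLast]
    | cons y ys => simpa [pvAddLast] using ih

theorem pvJoin_singleton (c : String) : PySem.Str.join ";" [c] = c := by
  apply String.toList_inj.mp
  simp [PySem.Str.toList_join, PySem.Chars.join_singleton]

theorem pvJoin_cons (c y : String) (rest : List String) :
    PySem.Str.join ";" (c :: y :: rest) = PySem.Str.join ";" ((c ++ (";" ++ y)) :: rest) := by
  apply String.toList_inj.mp
  cases rest with
  | nil => simp [PySem.Str.toList_join, PySem.Chars.join_singleton, PySem.Chars.join_cons_cons]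
  | cons r rs => simp [PySem.Str.toList_join, PySem.Chars.join_cons_cons]

-- the four shapes one step of A's loop can take
theorem pvStepA_merge (l1 : List (List String)) (l2 : List String) (c y : String)
    (hy : pvKey y = true) :
    pvStepA (l1, l2 ++ [c], []) y = (l1, l2 ++ [c ++ (";" ++ y)], []) := by
  unfold pvKey at hy
  simp [pvStepA, hy, pvAddLast_append]

theorem pvStepA_flush (l1 : List (List String)) (l2 pend : List String) (y : String)
    (hy : pvKey y = true) (hp : pend ≠ []) :
    pvStepA (l1, l2, pend) y = (l1 ++ [pend], l2 ++ [y], []) := by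
  unfold pvKey at hy
  simp [pvStepA, hy, hp]

theorem pvStepA_first (l1 : List (List String)) (y : String) (hy : pvKey y = true) :
    pvStepA (l1, [], []) y = (l1, [y], []) := by
  unfold pvKey at hy
  simp [pvStepA, hy]

theorem pvStepA_acc (l1 : List (List String)) (l2 acc : List String) (y : String)
    (hy : pvKey y = false) :
    pvStepA (l1, l2, acc) y = (l1, l2, acc ++ [y]) := by
  unfold pvKey at hy
  simp [pvStepA, hy]

-- A's loop over a run of non-CPhase lines just extends accum
theorem pvFoldA_nonC (run : List String) (h : ∀ y ∈ run, pvKey y = false) :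
    ∀ (l1 : List (List String)) (l2 acc : List String),
      List.foldl pvStepA (l1, l2, acc) run = (l1, l2, acc ++ run) := by
  induction run with
  | nil => intro l1 l2 acc; simp
  | cons x xs ih =>
    intro l1 l2 acc
    rw [List.foldl_cons, pvStepA_acc _ _ _ _ (h x (by simp))]
    simpa using ih (fun y hy => h y (by simp [hy])) l1 l2 (acc ++ [x])

-- A's loop over a run of CPhase lines, started just after a CPhase append: merges into the last entry
theorem pvFoldA_merge (run : List String) (h : ∀ y ∈ run, pvKey y = true) :
    ∀ (l1 : List (List String)) (l2 : List String) (c : String),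
      List.foldl pvStepA (l1, l2 ++ [c], []) run
        = (l1, l2 ++ [PySem.Str.join ";" (c :: run)], []) := by
  induction run with
  | nil => intro l1 l2 c; simp [pvJoin_singleton]
  | cons y ys ih =>
    intro l1 l2 c
    rw [List.foldl_cons, pvStepA_merge _ _ _ _ (h y (by simp)),
      ih (fun z hz => h z (by simp [hz])) l1 l2 (c ++ (";" ++ y)), pvJoin_cons]

-- invariant: states B can be in (initial / after a non-CPhase run / after a CPhase run)
def pvInv (script pending l2 : List String) : Prop :=
  match script with
  | [] => True
  | x :: _ => if pvKey x then (pending ≠ [] ∨ l2 = []) else pending = []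

theorem pvDropWhile_head (p : String → Bool) (xs : List String) :
    ∀ y ys, xs.dropWhile p = y :: ys → p y = false := by
  induction xs with
  | nil => intro y ys h; simp at h
  | cons x xs ih =>
    intro y ys h
    by_cases hx : p x = true
    · rw [List.dropWhile_cons_of_pos hx] at h; exact ih y ys h
    · rw [List.dropWhile_cons_of_neg (by simpa using hx)] at h
      cases h; simpa using hx

theorem pvMain : ∀ (n : Nat) (script : List String), script.length ≤ n →
    ∀ (pending : List String) (l1 : List (List String)) (l2 : List String),
      pvInv script pending l2 →
      (let st := List.foldl pvStepA (l1, l2, pending) script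
       (st.1 ++ [st.2.2], st.2.1)) = pvGoB pending l1 l2 script := by
  intro n
  induction n with
  | zero =>
    intro script hlen pending l1 l2 _
    have : script = [] := List.eq_nil_of_length_eq_zero (Nat.le_zero.mp hlen)
    subst this
    simp [pvGoB]
  | succ n ih =>
    intro script hlen pending l1 l2 hinv
    cases script with
    | nil => simp [pvGoB]
    | cons x xs =>
      rw [pvGoB]
      set p : String → Bool :=
        fun y => (PySem.Str.slice y none (some 6) == "CPhase")
                   == (PySem.Str.slice x none (some 6) == "CPhase") with hp
      have hsplit : ∀ st : List (List String) × List String × List String,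
          List.foldl pvStepA st (x :: xs)
            = List.foldl pvStepA
                (List.foldl pvStepA (pvStepA st x) (xs.takeWhile p)) (xs.dropWhile p) := by
        intro st
        rw [List.foldl_cons]
        conv_lhs => rw [show xs = xs.takeWhile p ++ xs.dropWhile p from
          (List.takeWhile_append_dropWhile).symm]
        rw [List.foldl_append]
      have hrestlen : (xs.dropWhile p).length ≤ n :=
        Nat.le_of_lt_succ (Nat.lt_of_le_of_lt (List.length_dropWhile_le _ _)
          (Nat.lt_of_lt_of_le (by simp) hlen))
      by_cases hkx : pvKey x = true
      · -- CPhase run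
        have hpk : ∀ y, p y = pvKey y := by
          intro y
          simp only [hp, pvKey] at hkx ⊢
          rw [hkx]
          cases h : (PySem.Str.slice y none (some 6) == "CPhase") <;> simp_all
        have htake : ∀ y ∈ xs.takeWhile p, pvKey y = true := by
          intro y hy; rw [← hpk]; exact List.mem_takeWhile_imp hy
        have hrinv : ∀ l2' : List String, pvInv (xs.dropWhile p) [] l2' := by
          intro l2'
          cases hr : xs.dropWhile p with
          | nil => trivial
          | cons y ys =>
            have := pvDropWhile_head p xs y ys hr
            rw [hpk] at this
            simp [pvInv, this]
        rw [show (PySem.Str.slice x none (some 6) == "CPhase") = true from hkx]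
        simp only [if_true]
        by_cases hpend : pending = []
        · have hinv' : (if pvKey x = true then pending ≠ [] ∨ l2 = [] else pending = []) := hinv
          rw [if_pos hkx] at hinv'
          have hl2 : l2 = [] := hinv'.resolve_left (fun h => h hpend)
          subst hpend hl2
          rw [hsplit, pvStepA_first _ _ hkx,
            show ([x] : List String) = [] ++ [x] by simp, pvFoldA_merge _ htake]
          rw [if_neg (by simp)]
          simpa using ih (xs.dropWhile p) hrestlen []
            l1 ([] ++ [PySem.Str.join ";" (x :: xs.takeWhile p)]) (hrinv _)
        · rw [hsplit, pvStepA_flush _ _ _ _ hkx hpend, pvFoldA_merge _ htake,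
            if_pos hpend]
          exact ih (xs.dropWhile p) hrestlen []
            (l1 ++ [pending]) (l2 ++ [PySem.Str.join ";" (x :: xs.takeWhile p)]) (hrinv _)
      · -- non-CPhase run
        have hkx' : pvKey x = false := by simpa using hkx
        have hpk : ∀ y, p y = !(pvKey y) := by
          intro y
          simp only [hp, pvKey] at hkx' ⊢
          rw [hkx']
          cases h : (PySem.Str.slice y none (some 6) == "CPhase") <;> simp_all
        have htake : ∀ y ∈ xs.takeWhile p, pvKey y = false := by
          intro y hy
          have := List.mem_takeWhile_imp hy
          rw [hpk] at this; simpa using this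
        have hinv' : (if pvKey x = true then pending ≠ [] ∨ l2 = [] else pending = []) := hinv
        rw [if_neg (by simp [hkx'])] at hinv'
        have hpend : pending = [] := hinv'
        subst hpend
        rw [show (PySem.Str.slice x none (some 6) == "CPhase") = false from hkx']
        simp only [Bool.false_eq_true, if_false]
        rw [hsplit, pvStepA_acc _ _ _ _ hkx', pvFoldA_nonC _ htake]
        have hrinv : pvInv (xs.dropWhile p) (x :: xs.takeWhile p) l2 := by
          cases hr : xs.dropWhile p with
          | nil => trivial
          | cons y ys =>
            have := pvDropWhile_head p xs y ys hr
            rw [hpk] at this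
            simp only [Bool.not_eq_false'] at this
            simp [pvInv, this]
        simpa using ih (xs.dropWhile p) hrestlen (x :: xs.takeWhile p) l1 l2 hrinv

-- ===== VERDICT (by name: the statement is the Claim_ definition above) =====
theorem split_entangling_spec : Claim_equal_split_entangling := by
  intro script _
  unfold Spec_split_entangling split_entangling split_entangling_alt
  apply pvMain script.length script le_rfl
  cases script with
  | nil => trivial
  | cons x xs => by_cases h : pvKey x = true <;> simp [pvInv, h]
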